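-- pv_equiv track=rewrite | github.com/jae251/DCA_sequence_scoring | utils/utilities.py | count_combinations
-- ===== SOURCE A (Python) =====
-- def count_combinations(items, max_simul_draws):
--     count = 0
--     if max_simul_draws > len(items):
--         max_simul_draws = len(items)
--     from itertools import combinations
--     for i in range(2, max_simul_draws + 1):
--         for c in combinations(items, i):
--             if len(set(c)) == len(c):
--                 count += 1
--     return count
-- ===== SOURCE B (Python) =====
-- def count_combinations(items, max_simul_draws):
--     from collections import Counter
--     K = min(max_simul_draws, len(items))
--     if K < 2:
--         return 0
--     e = [1] + [0] * K
--     for m in Counter(items).values():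
--         e = [1] + [a + m * b for a, b in zip(e[1:], e)]
--     return sum(e[2:])
-- ===== Notes on version B (the rewrite author's own statement) =====
-- stated objective: faster
-- what changed: Replaces the exponential enumeration of all size-2..max combinations (checking each for distinct values) with a polynomial DP: group items by value with a Counter and compute the elementary symmetric polynomials of the multiplicities, summing e_2..e_K.
import Mathlib
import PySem

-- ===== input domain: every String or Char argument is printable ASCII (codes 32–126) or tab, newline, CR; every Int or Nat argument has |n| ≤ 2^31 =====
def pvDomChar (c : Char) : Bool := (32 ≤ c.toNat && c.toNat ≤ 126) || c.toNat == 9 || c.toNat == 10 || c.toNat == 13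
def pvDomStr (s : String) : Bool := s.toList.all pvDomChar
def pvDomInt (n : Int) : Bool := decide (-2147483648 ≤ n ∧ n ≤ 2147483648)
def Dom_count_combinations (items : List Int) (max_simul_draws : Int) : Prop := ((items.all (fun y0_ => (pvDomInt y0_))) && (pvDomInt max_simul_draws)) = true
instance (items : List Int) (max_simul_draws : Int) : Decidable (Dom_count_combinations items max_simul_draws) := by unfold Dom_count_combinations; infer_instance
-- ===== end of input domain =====

-- B replaces A's exponential enumeration of all size-2..max combinations by a DP over the
-- value multiplicities (elementary symmetric polynomials), computing the same count.

-- ===== PORT A =====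
-- itertools.combinations(items, k) as a list, in itertools' order (by position, lexicographic)
def pyCombos : List Int → Nat → List (List Int)
  | _, 0 => [[]]
  | [], _ + 1 => []
  | x :: xs, k + 1 => ((pyCombos xs k).map (fun c => x :: c)) ++ pyCombos xs (k + 1)

def count_combinations (items : List Int) (max_simul_draws : Int) : Int :=
  -- count = 0 is the fold's initial accumulator
  let msd := if max_simul_draws > (items.length : Int) then (items.length : Int) else max_simul_draws
  (PySem.List.pyRange 2 (msd + 1) 1).foldl
    (fun count i =>
      (pyCombos items i.toNat).foldl
        (fun count c =>
          if (PySem.Set.ofList c).length == c.length then count + 1 else count)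
        count)
    0

-- ===== PORT B =====
def count_combinations_alt (items : List Int) (max_simul_draws : Int) : Int :=
  let K := min max_simul_draws (items.length : Int)
  if K < 2 then 0
  else
    let e0 : List Int := 1 :: List.replicate K.toNat 0      -- [1] + [0]*K
    let e := ((PySem.Dict.counter items).values).foldl
      (fun e m => 1 :: ((e.drop 1).zip e).map (fun p => p.1 + m * p.2)) e0   -- e[1:] = drop 1
    (e.drop 2).sum                                           -- sum(e[2:])

-- ===== PRECONDITION & SPEC =====
def Spec_count_combinations (items : List Int) (max_simul_draws : Int) (out : Int) : Prop := out = count_combinations_alt items max_simul_draws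
instance (items : List Int) (max_simul_draws : Int) (out : Int) : Decidable (Spec_count_combinations items max_simul_draws out) := by unfold Spec_count_combinations; infer_instance

-- ===== CLAIM (what is proved, stated in full; the proofs are below) =====
def Claim_equal_count_combinations : Prop := ∀ (items : List Int) (max_simul_draws : Int), Dom_count_combinations items max_simul_draws → Spec_count_combinations items max_simul_draws (count_combinations items max_simul_draws)

-- ===== LEMMAS AND PROOFS =====

-- elementary symmetric polynomial of a multiset, as sum over size-k submultisets
def esymM (s : Multiset Int) (k : Nat) : Int := ((s.powersetCard k).map Multiset.prod).sum

lemma esymM_zero (s : Multiset Int) : esymM s 0 = 1 := by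
  simp [esymM, Multiset.powersetCard_zero_left]

lemma esymM_nil (k : Nat) : esymM 0 (k + 1) = 0 := by
  simp [esymM]

lemma esymM_cons (a : Int) (s : Multiset Int) (k : Nat) :
    esymM (a ::ₘ s) (k + 1) = esymM s (k + 1) + a * esymM s k := by
  simp [esymM, Multiset.powersetCard_cons, Multiset.map_map, Function.comp,
    Multiset.prod_cons, Multiset.sum_map_mul_left]

-- number of combinations of size k of xs that are duplicate-free and avoid the values in B
def ncnt (xs : List Int) (k : Nat) (B : List Int) : Nat :=
  (pyCombos xs k).countP (fun c => decide (c.Nodup ∧ ∀ b ∈ B, b ∉ c))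

-- the multiplicities of the distinct values of xs outside B, as a multiset
def multsOf (xs B : List Int) : Multiset Int :=
  ((xs.dedup.filter (fun v => decide (v ∉ B))).map (fun v => (xs.count v : Int)) : List Int)

lemma ncnt_zero (xs B : List Int) : ncnt xs 0 B = 1 := by
  simp [ncnt, pyCombos]

lemma ncnt_nil (k : Nat) (B : List Int) : ncnt [] (k + 1) B = 0 := by
  simp [ncnt, pyCombos]

lemma ncnt_cons (x : Int) (xs : List Int) (k : Nat) (B : List Int) :
    ncnt (x :: xs) (k + 1) B =
      (if x ∈ B then 0 else ncnt xs k (x :: B)) + ncnt xs (k + 1) B := by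
  unfold ncnt
  rw [pyCombos, List.countP_append, List.countP_map]
  congr 1
  by_cases hx : x ∈ B
  · simp only [if_pos hx]
    apply List.countP_eq_zero.mpr
    intro c _
    simp only [Function.comp_apply, decide_eq_true_eq]
    rintro ⟨-, h2⟩
    exact (h2 x hx) (List.mem_cons_self)
  · simp only [if_neg hx]
    apply List.countP_congr
    intro c _
    simp only [Function.comp_apply]
    simp only [decide_eq_true_eq, List.nodup_cons, List.mem_cons]
    constructor
    · rintro ⟨⟨hxc, hnd⟩, hB⟩
      exact ⟨hnd, fun b hb => hb.elim (fun h => h ▸ hxc)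
        (fun hbB hbc => (hB b hbB) (Or.inr hbc))⟩
    · rintro ⟨hnd, hB⟩
      refine ⟨⟨hB x (Or.inl rfl), hnd⟩, fun b hbB => ?_⟩
      rintro (rfl | hbc)
      · exact hx hbB
      · exact hB b (Or.inr hbB) hbc

-- pulling one element out of a nodup filter
lemma filter_perm {l B : List Int} {x : Int} (hl : l.Nodup) (hx : x ∈ l) (hB : x ∉ B) :
    (l.filter (fun v => decide (v ∉ B))).Perm
      (x :: l.filter (fun v => decide (v ∉ (x :: B)))) := by
  apply (List.perm_ext_iff_of_nodup (hl.filter _) ?_).mpr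
  · intro v
    simp only [List.mem_filter, List.mem_cons, decide_eq_true_eq, List.mem_cons]
    constructor
    · rintro ⟨hvl, hvB⟩
      by_cases hvx : v = x
      · exact Or.inl hvx
      · exact Or.inr ⟨hvl, fun h => h.elim hvx hvB⟩
    · rintro (rfl | ⟨hvl, hv⟩)
      · exact ⟨hx, hB⟩
      · exact ⟨hvl, fun h => hv (Or.inr h)⟩
  · apply List.nodup_cons.mpr
    refine ⟨?_, hl.filter _⟩
    intro h
    simp only [List.mem_filter, decide_eq_true_eq] at h
    exact h.2 (List.mem_cons_self)

lemma multsOf_cons_mem {x : Int} {B : List Int} (xs : List Int) (h : x ∈ B) :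
    multsOf (x :: xs) B = multsOf xs B := by
  unfold multsOf
  have hcongr : ∀ (l : List Int),
      (l.filter (fun v => decide (v ∉ B))).map (fun v => ((x :: xs).count v : Int)) =
      (l.filter (fun v => decide (v ∉ B))).map (fun v => (xs.count v : Int)) := by
    intro l
    apply List.map_congr_left
    intro v hv
    simp only [List.mem_filter, decide_eq_true_eq] at hv
    have hne : v ≠ x := fun he => hv.2 (he ▸ h)
    simp [Ne.symm hne]
  by_cases hmem : x ∈ xs
  · rw [List.dedup_cons_of_mem hmem, hcongr]
  · rw [List.dedup_cons_of_notMem hmem, List.filter_cons_of_neg (by simpa using h), hcongr]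

lemma multsOf_cons_not_mem {x : Int} {B : List Int} (xs : List Int) (h : x ∉ B) :
    multsOf (x :: xs) B = ((xs.count x : Int) + 1) ::ₘ multsOf xs (x :: B) := by
  unfold multsOf
  have hcount : ∀ (l : List Int),
      (l.filter (fun v => decide (v ∉ (x :: B)))).map (fun v => ((x :: xs).count v : Int)) =
      (l.filter (fun v => decide (v ∉ (x :: B)))).map (fun v => (xs.count v : Int)) := by
    intro l
    apply List.map_congr_left
    intro v hv
    simp only [List.mem_filter, decide_eq_true_eq, List.mem_cons] at hv
    have hne : v ≠ x := fun he => hv.2 (Or.inl he)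
    simp [Ne.symm hne]
  by_cases hmem : x ∈ xs
  · rw [List.dedup_cons_of_mem hmem]
    have hperm := filter_perm (List.nodup_dedup xs) (List.mem_dedup.mpr hmem) h
    calc ((xs.dedup.filter (fun v => decide (v ∉ B))).map
            (fun v => ((x :: xs).count v : Int)) : Multiset Int)
        = ((x :: xs.dedup.filter (fun v => decide (v ∉ (x :: B)))).map
            (fun v => ((x :: xs).count v : Int)) : List Int) := by
          exact_mod_cast Multiset.coe_eq_coe.mpr (hperm.map _)
      _ = ((xs.count x : Int) + 1) ::ₘ multsOf xs (x :: B) := by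
          have hc : ((List.count x xs + 1 : Nat) : Int) = (List.count x xs : Int) + 1 := by
            push_cast; ring
          simp only [multsOf, List.map_cons, List.count_cons_self, hcount, hc,
            ← Multiset.cons_coe]
  · rw [List.dedup_cons_of_notMem hmem, List.filter_cons_of_pos (by simpa using h)]
    have hfeq : xs.dedup.filter (fun v => decide (v ∉ B)) =
        xs.dedup.filter (fun v => decide (v ∉ (x :: B))) := by
      apply List.filter_congr
      intro v hv
      have hne : v ≠ x := fun he => hmem (he ▸ List.mem_dedup.mp hv)
      simp [List.mem_cons, hne]
    have hc : ((List.count x xs + 1 : Nat) : Int) = (List.count x xs : Int) + 1 := by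
      push_cast; ring
    simp only [List.map_cons, List.count_cons_self, hfeq, hcount, hc,
      ← Multiset.cons_coe]

lemma multsOf_ban {x : Int} {B : List Int} (xs : List Int) (h : x ∉ B) :
    multsOf xs B = if x ∈ xs then ((xs.count x : Int)) ::ₘ multsOf xs (x :: B)
                   else multsOf xs (x :: B) := by
  unfold multsOf
  by_cases hmem : x ∈ xs
  · rw [if_pos hmem]
    have hperm := filter_perm (List.nodup_dedup xs) (List.mem_dedup.mpr hmem) h
    calc ((xs.dedup.filter (fun v => decide (v ∉ B))).map
            (fun v => (xs.count v : Int)) : Multiset Int)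
        = ((x :: xs.dedup.filter (fun v => decide (v ∉ (x :: B)))).map
            (fun v => (xs.count v : Int)) : List Int) := by
          exact_mod_cast Multiset.coe_eq_coe.mpr (hperm.map _)
      _ = _ := by rw [List.map_cons, ← Multiset.cons_coe]
  · rw [if_neg hmem]
    have hfeq : xs.dedup.filter (fun v => decide (v ∉ B)) =
        xs.dedup.filter (fun v => decide (v ∉ (x :: B))) := by
      apply List.filter_congr
      intro v hv
      have hne : v ≠ x := fun he => hmem (he ▸ List.mem_dedup.mp hv)
      simp [List.mem_cons, hne]
    rw [hfeq]

lemma multsOf_nil (B : List Int) : multsOf [] B = 0 := by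
  simp [multsOf]

-- the central identity: the distinct-valued combination count is the elementary symmetric value
lemma ncnt_eq_esymM (xs : List Int) : ∀ (k : Nat) (B : List Int),
    ((ncnt xs k B : Nat) : Int) = esymM (multsOf xs B) k := by
  induction xs with
  | nil =>
    intro k B
    cases k with
    | zero => simp [ncnt_zero, esymM_zero]
    | succ k => simp [ncnt_nil, multsOf_nil, esymM_nil]
  | cons x xs ih =>
    intro k B
    cases k with
    | zero => simp [ncnt_zero, esymM_zero]
    | succ k =>
      rw [ncnt_cons]
      by_cases hx : x ∈ B
      · rw [if_pos hx, multsOf_cons_mem xs hx]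
        push_cast
        rw [ih (k + 1) B]
        ring
      · rw [if_neg hx, multsOf_cons_not_mem xs hx, esymM_cons]
        push_cast
        rw [ih k (x :: B), ih (k + 1) B, multsOf_ban xs hx]
        by_cases hmem : x ∈ xs
        · rw [if_pos hmem, esymM_cons]
          ring
        · rw [if_neg hmem, List.count_eq_zero.mpr hmem]
          push_cast
          ring

-- Python's len(set(c)) == len(c) is exactly the Nodup test
lemma pred_eq (c : List Int) :
    ((PySem.Set.ofList c).length == c.length) = decide (c.Nodup ∧ ∀ b ∈ ([] : List Int), b ∉ c) := by
  have hperm : (PySem.Set.ofList c : List Int).Perm c.dedup := by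
    apply (List.perm_ext_iff_of_nodup (PySem.Set.nodup_ofList c) (List.nodup_dedup c)).mpr
    intro a
    rw [PySem.Set.mem_ofList, List.mem_dedup]
  by_cases h : c.Nodup
  · have : (PySem.Set.ofList c : List Int).length = c.length := by
      rw [hperm.length_eq, List.dedup_eq_self.mpr h]
    simp [this, h]
  · have hne : (PySem.Set.ofList c : List Int).length ≠ c.length := by
      rw [hperm.length_eq]
      intro he
      exact h (List.dedup_eq_self.mp ((List.dedup_sublist c).eq_of_length he))
    simp [h, hne]

-- B-side: one DP step multiplies by (1 + m·x), i.e. conses m onto the multiset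
lemma step_map (m : Int) (s : Multiset Int) (K : Nat) :
    (1 :: (((((List.range (K + 1)).map (esymM s)).drop 1).zip
        ((List.range (K + 1)).map (esymM s))).map (fun p => p.1 + m * p.2)) : List Int) =
    (List.range (K + 1)).map (esymM (m ::ₘ s)) := by
  apply List.ext_getElem
  · simp
  · intro i h1 h2
    match i with
    | 0 =>
      simp [esymM_zero]
    | (j + 1) =>
      simp only [List.length_map, List.length_range] at h2
      have hj : j + 1 < K + 1 := h2
      simp only [List.getElem_cons_succ, List.getElem_map, List.getElem_zip,
        List.getElem_drop, List.getElem_range, esymM_cons]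
      rw [Nat.add_comm 1 j]

lemma fold_vals (K : Nat) : ∀ (vs : List Int) (s : Multiset Int),
    vs.foldl (fun e m => 1 :: ((e.drop 1).zip e).map (fun p => p.1 + m * p.2))
      ((List.range (K + 1)).map (esymM s)) =
    (List.range (K + 1)).map (esymM ((vs : Multiset Int) + s)) := by
  intro vs
  induction vs with
  | nil => intro s; simp
  | cons v vs ih =>
    intro s
    rw [List.foldl_cons, step_map, ih (v ::ₘ s)]
    congr 1
    rw [← Multiset.cons_coe, Multiset.add_cons, Multiset.cons_add]

lemma e0_eq (K : Nat) : (1 :: List.replicate K (0 : Int)) = (List.range (K + 1)).map (esymM 0) := by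
  apply List.ext_getElem
  · simp
  · intro i h1 h2
    match i with
    | 0 => simp [esymM_zero]
    | (j + 1) =>
      simp only [List.length_cons, List.length_replicate] at h1
      simp only [List.getElem_cons_succ, List.getElem_replicate, List.getElem_map,
        List.getElem_range, esymM_nil]

-- Counter(items).values() is, as a multiset, multsOf items []
lemma coe_values (xs : List Int) :
    (((PySem.Dict.counter xs).values : List Int) : Multiset Int) = multsOf xs [] := by
  have hv : (PySem.Dict.counter xs).values =
      (PySem.Set.ofList xs : List Int).map (fun v => (xs.count v : Int)) := by
    show ((PySem.Dict.counter xs).items).map Prod.snd = _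
    rw [PySem.Dict.items_counter, List.map_map]
    rfl
  have hperm : (PySem.Set.ofList xs : List Int).Perm xs.dedup := by
    apply (List.perm_ext_iff_of_nodup (PySem.Set.nodup_ofList xs) (List.nodup_dedup xs)).mpr
    intro a
    rw [PySem.Set.mem_ofList, List.mem_dedup]
  rw [hv, multsOf]
  simp only [List.not_mem_nil, not_false_iff, decide_true, List.filter_true]
  exact Multiset.coe_eq_coe.mpr (hperm.map _)

-- ===== VERDICT (by name: the statement is the Claim_ definition above) =====
theorem count_combinations_spec : Claim_equal_count_combinations := by
  unfold Claim_equal_count_combinations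
  intro items msd _
  unfold Spec_count_combinations
  have hm : (if msd > (items.length : Int) then (items.length : Int) else msd) =
      min msd (items.length : Int) := by
    rw [min_def]; split_ifs <;> omega
  simp only [count_combinations, count_combinations_alt, hm]
  set K := min msd (items.length : Int) with hK
  simp only [PySem.List.foldl_count_if, pred_eq]
  have hncnt : ∀ i : Int,
      (pyCombos items i.toNat).countP (fun c => decide (c.Nodup ∧ ∀ b ∈ ([] : List Int), b ∉ c)) =
      ncnt items i.toNat [] := fun _ => rfl
  simp only [hncnt, PySem.List.foldl_add, zero_add]
  by_cases h2 : K < 2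
  · rw [if_pos h2, PySem.List.pyRange_one_eq_nil (by omega)]
    simp
  · rw [if_neg h2]
    have hKnn : (0 : Int) ≤ K := by omega
    set K' := K.toNat with hK'
    have hKK : K = (K' : Int) := by omega
    rw [e0_eq K', fold_vals K', coe_values, add_zero]
    rw [PySem.List.pyRange_one]
    have hrange : ((K + 1) - 2).toNat = K' - 1 := by omega
    rw [hrange, List.map_map]
    rw [← List.map_drop]
    have hsplit : List.range (K' + 1) = List.range 2 ++ (List.range (K' - 1)).map (fun k => 2 + k) := by
      have : K' + 1 = 2 + (K' - 1) := by omega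
      rw [this, List.range_add]
    rw [hsplit]
    have hdrop : (List.range 2 ++ (List.range (K' - 1)).map (fun k => 2 + k)).drop 2 =
        (List.range (K' - 1)).map (fun k => 2 + k) := by
      apply List.drop_left'
      simp
    rw [hdrop, List.map_map]
    congr 1
    apply List.map_congr_left
    intro k _
    simp only [Function.comp_apply]
    have harg : ((2 : Int) + (k : Int)).toNat = 2 + k := by omega
    rw [ncnt_eq_esymM, harg]
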